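-- pv_equiv track=rewrite | github.com/cofibus/ILF-Bioinformatics-Project | oma_search/get_hormone_sequences.py | create_ligand_sequence_dict
-- ===== SOURCE A (Python) =====
-- def create_ligand_sequence_dict(peptide_dicts):
--   """Creates a dictionary mapping ligand names to lists of sequences.
--
--   Args:
--     peptide_dicts: A list of peptide dictionaries.
--
--   Returns:
--     A dictionary where keys are ligand names and values are lists of sequences.
--   """
--   all_sequences_dict = {}
--   for d in peptide_dicts:
--       ligand = d['Peptide name'].strip().lower()
--       sequence = d['Sequence']
--       if sequence is not None:
--           if ligand in all_sequences_dict: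
--               all_sequences_dict[ligand].append(sequence)
--           else:
--               all_sequences_dict[ligand] = [sequence]
--   return all_sequences_dict
-- ===== SOURCE B (Python) =====
-- def create_ligand_sequence_dict(peptide_dicts):
--     """Group sequences by normalized ligand name: collect (key, sequence) pairs
--     in one pass, then gather each first-seen key's sequences."""
--     pairs = [(d['Peptide name'].strip().lower(), d['Sequence'])
--              for d in peptide_dicts if d['Sequence'] is not None]
--     return {k: [s for q, s in pairs if q == k]
--             for k in dict.fromkeys(q for q, _ in pairs)}
-- ===== Notes on version B (the rewrite author's own statement) =====
-- stated objective: alternative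
-- what changed: B replaces A's incremental dict-building loop (membership test, then append-or-create per element) by a two-phase pass: first flatten the input into a list of (normalized-key, sequence) pairs, then build the result with a dict comprehension over the first-occurrence-ordered distinct keys, gathering each key's sequences by filtering the pair list.
import Mathlib
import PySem

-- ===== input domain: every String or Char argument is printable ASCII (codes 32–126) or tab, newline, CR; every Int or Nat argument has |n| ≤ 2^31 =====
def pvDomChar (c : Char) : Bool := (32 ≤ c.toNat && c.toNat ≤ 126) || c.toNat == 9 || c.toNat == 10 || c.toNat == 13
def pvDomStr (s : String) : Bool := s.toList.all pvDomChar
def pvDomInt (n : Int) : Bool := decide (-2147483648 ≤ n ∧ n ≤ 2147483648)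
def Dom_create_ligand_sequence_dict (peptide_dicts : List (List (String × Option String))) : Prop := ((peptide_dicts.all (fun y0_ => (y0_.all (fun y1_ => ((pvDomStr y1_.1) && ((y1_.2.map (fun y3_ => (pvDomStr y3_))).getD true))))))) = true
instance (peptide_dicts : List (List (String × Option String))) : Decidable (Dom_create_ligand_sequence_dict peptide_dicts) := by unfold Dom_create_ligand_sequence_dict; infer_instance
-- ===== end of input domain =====

-- B groups sequences by building the (key, sequence) pair list first and then gathering
-- per distinct key, instead of A's incremental append-or-create dict loop (objective: alternative).


-- ===== PORT A =====
-- A's loop body: ligand = d['Peptide name'].strip().lower(); sequence = d['Sequence'];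
-- the `none` fallthroughs are exactly where Python raises (KeyError / AttributeError), excluded by Pre_.
def pvStepA (acc : PySem.Dict String (List String)) (d : List (String × Option String)) :
    PySem.Dict String (List String) :=
  match PySem.Dict.get? (PySem.Dict.mk d) "Peptide name" with
  | none => acc          -- KeyError: excluded by Pre_
  | some none => acc     -- None.strip(): AttributeError, excluded by Pre_
  | some (some nm) =>
    let ligand := PySem.Str.lower (PySem.Str.strip nm)
    match PySem.Dict.get? (PySem.Dict.mk d) "Sequence" with
    | none => acc        -- KeyError: excluded by Pre_
    | some none => acc   -- sequence is None: skip
    | some (some seq) =>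
      if PySem.Dict.contains acc ligand then
        PySem.Dict.insert acc ligand (PySem.Dict.getD acc ligand [] ++ [seq])
      else
        PySem.Dict.insert acc ligand [seq]

def create_ligand_sequence_dict (peptide_dicts : List (List (String × Option String))) : List (String × List String) :=
  (peptide_dicts.foldl pvStepA PySem.Dict.empty).items

-- ===== PORT B =====
-- pairs = [(d['Peptide name'].strip().lower(), d['Sequence']) for d in peptide_dicts if d['Sequence'] is not None]
def pvPairs (peptide_dicts : List (List (String × Option String))) : List (String × String) :=
  peptide_dicts.filterMap (fun d =>
    match PySem.Dict.get? (PySem.Dict.mk d) "Sequence" with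
    | some (some s) =>
      match PySem.Dict.get? (PySem.Dict.mk d) "Peptide name" with
      | some (some nm) => some (PySem.Str.lower (PySem.Str.strip nm), s)
      | _ => none      -- Python raises here; excluded by Pre_
    | _ => none)

-- {k: [s for q, s in pairs if q == k] for k in dict.fromkeys(q for q, _ in pairs)}
def create_ligand_sequence_dict_alt (peptide_dicts : List (List (String × Option String))) : List (String × List String) :=
  let pairs := pvPairs peptide_dicts
  (PySem.Set.ofList (pairs.map (·.1))).map
    (fun k => (k, (pairs.filter (fun p => p.1 == k)).map (·.2)))

-- ===== PRECONDITION & SPEC =====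
-- Pre_ excludes exactly the inputs where A raises: a dict without key 'Peptide name' or 'Sequence'
-- (KeyError), or whose 'Peptide name' value is None (AttributeError on .strip()).
def Pre_create_ligand_sequence_dict (peptide_dicts : List (List (String × Option String))) : Prop :=
  ∀ d ∈ peptide_dicts,
    ((PySem.Dict.get? (PySem.Dict.mk d) "Peptide name").getD none).isSome = true ∧
    (PySem.Dict.get? (PySem.Dict.mk d) "Sequence").isSome = true
instance (peptide_dicts : List (List (String × Option String))) : Decidable (Pre_create_ligand_sequence_dict peptide_dicts) := by unfold Pre_create_ligand_sequence_dict; infer_instance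

def pvWitness_create_ligand_sequence_dict : (List (List (String × Option String))) :=
  [[("Peptide name", some " Insulin "), ("Sequence", some "MALW")],
   [("Peptide name", some "insulin"), ("Sequence", some "QQQ")],
   [("Peptide name", some "GLP-1"), ("Sequence", none)]]

def Spec_create_ligand_sequence_dict (peptide_dicts : List (List (String × Option String))) (out : List (String × List String)) : Prop := out = create_ligand_sequence_dict_alt peptide_dicts
instance (peptide_dicts : List (List (String × Option String))) (out : List (String × List String)) : Decidable (Spec_create_ligand_sequence_dict peptide_dicts out) := by unfold Spec_create_ligand_sequence_dict; infer_instance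

-- ===== CLAIM (what is proved, stated in full; the proofs are below) =====
def Claim_equal_create_ligand_sequence_dict : Prop := ∀ (peptide_dicts : List (List (String × Option String))), Dom_create_ligand_sequence_dict peptide_dicts → Pre_create_ligand_sequence_dict peptide_dicts → Spec_create_ligand_sequence_dict peptide_dicts (create_ligand_sequence_dict peptide_dicts)

-- ===== LEMMAS AND PROOFS =====

-- the grouped shape B produces, for an arbitrary pair list
def pvGroups (ps : List (String × String)) : List (String × List String) :=
  (PySem.Set.ofList (ps.map (·.1))).map
    (fun k => (k, (ps.filter (fun p => p.1 == k)).map (·.2)))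

-- A's loop step on a single extracted pair
def pvStepP (acc : PySem.Dict String (List String)) (p : String × String) :
    PySem.Dict String (List String) :=
  if PySem.Dict.contains acc p.1 then
    PySem.Dict.insert acc p.1 (PySem.Dict.getD acc p.1 [] ++ [p.2])
  else
    PySem.Dict.insert acc p.1 [p.2]

-- under Pre_, A's fold over the dicts is the fold of pvStepP over the extracted pairs
lemma foldA_eq_foldP (ds : List (List (String × Option String)))
    (h : ∀ d ∈ ds,
      ((PySem.Dict.get? (PySem.Dict.mk d) "Peptide name").getD none).isSome = true ∧
      (PySem.Dict.get? (PySem.Dict.mk d) "Sequence").isSome = true)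
    (acc : PySem.Dict String (List String)) :
    ds.foldl pvStepA acc = (pvPairs ds).foldl pvStepP acc := by
  induction ds generalizing acc with
  | nil => rfl
  | cons d ds ih =>
    obtain ⟨h1, h2⟩ := h d (List.mem_cons_self ..)
    have hrest : ∀ d ∈ ds,
        ((PySem.Dict.get? (PySem.Dict.mk d) "Peptide name").getD none).isSome = true ∧
        (PySem.Dict.get? (PySem.Dict.mk d) "Sequence").isSome = true :=
      fun d hd => h d (List.mem_cons_of_mem _ hd)
    rcases hp : PySem.Dict.get? (PySem.Dict.mk d) "Peptide name" with _ | (_ | nm)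
    · rw [hp] at h1; simp at h1
    · rw [hp] at h1; simp at h1
    · rcases hs : PySem.Dict.get? (PySem.Dict.mk d) "Sequence" with _ | (_ | s)
      · rw [hs] at h2; simp at h2
      · simp only [List.foldl_cons, pvPairs, List.filterMap_cons, hp, hs, pvStepA]
        exact ih hrest acc
      · simp only [List.foldl_cons, pvPairs, List.filterMap_cons, hp, hs, pvStepA, pvStepP]
        exact ih hrest _

-- the central invariant: the pair fold builds exactly the grouped association list
lemma foldP_items (ps : List (String × String)) :
    (ps.foldl pvStepP PySem.Dict.empty).items = pvGroups ps := by
  induction ps using List.reverseRecOn with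
  | nil => rfl
  | append_singleton ps p ih =>
    obtain ⟨k, v⟩ := p
    set D := ps.foldl pvStepP PySem.Dict.empty with hD
    set G := PySem.Set.ofList (ps.map (·.1)) with hG
    set F : String → List String := fun c => (ps.filter (fun q => q.1 == c)).map (·.2) with hF
    have hitems : D.items = G.map (fun c => (c, F c)) := ih
    have hkeys : D.keys = G := by
      rw [PySem.Dict.keys, hitems, List.map_map]; exact List.map_id _
    have hcont : D.contains k = true ↔ k ∈ ps.map (·.1) := by
      rw [PySem.Dict.contains, hitems, List.any_map, List.any_eq_true]
      simp [hG, PySem.Set.mem_ofList]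
    rw [List.foldl_append, List.foldl_cons, List.foldl_nil, ← hD]
    by_cases hk : k ∈ ps.map (·.1)
    · -- key already present: A updates in place, the group list is unchanged
      have hkG : k ∈ G := (PySem.Set.mem_ofList _ _).mpr hk
      have hc : D.contains k = true := hcont.mpr hk
      have hget : D.getD k [] = F k :=
        PySem.Dict.getD_of_mem_items D
          (by rw [hitems]; exact List.mem_map_of_mem hkG)
          (by rw [hkeys]; exact PySem.Set.nodup_ofList _) []
      show (pvStepP D (k, v)).items = pvGroups (ps ++ [(k, v)])
      rw [pvStepP]
      simp only [hc, if_pos]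
      rw [PySem.Dict.items_insert_of_contains D _ hc, hitems, List.map_map, pvGroups]
      simp only [List.map_append, List.map_cons, List.map_nil]
      rw [PySem.Set.ofList_append_singleton, PySem.Set.add_of_mem hkG]
      refine List.map_congr_left (fun c hcG => ?_)
      by_cases hck : c = k
      · subst hck; simp [hget, hF]
      · simp [Function.comp, hck, Ne.symm hck, hF]
    · -- new key: A appends at the end, B appends the new group at the end
      have hkG : k ∉ G := fun hmem => hk ((PySem.Set.mem_ofList _ _).mp hmem)
      have hc : D.contains k = false := by
        rcases Bool.eq_false_or_eq_true (D.contains k) with h' | h'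
        · exact absurd (hcont.mp h') hk
        · exact h' 
      show (pvStepP D (k, v)).items = pvGroups (ps ++ [(k, v)])
      rw [pvStepP]
      simp only [hc, Bool.false_eq_true, if_neg, not_false_iff]
      rw [PySem.Dict.items_insert_of_not_contains D _ hc, hitems, pvGroups]
      simp only [List.map_append, List.map_cons, List.map_nil]
      rw [PySem.Set.ofList_append_singleton, PySem.Set.add_of_not_mem hkG, List.map_append]
      congr 1
      · refine List.map_congr_left (fun c hcG => ?_)
        have hck : k ≠ c := fun h' => hkG (h' ▸ hcG)
        simp [hck, hF]
      · simp
        intro a b hab h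
        exact hk (h ▸ List.mem_map_of_mem (f := fun x => (x.1 : String)) hab)

-- ===== VERDICT (by name: the statement is the Claim_ definition above) =====
theorem create_ligand_sequence_dict_spec : Claim_equal_create_ligand_sequence_dict := by
  intro pd _ hpre
  show _ = _
  rw [create_ligand_sequence_dict, create_ligand_sequence_dict_alt,
    foldA_eq_foldP pd hpre, foldP_items]
  rfl
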